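-- pv_equiv track=rewrite | github.com/Icejl/software | charles/gen.py | name_to_bytes
-- ===== SOURCE A (Python) =====
-- def num_to_list(arr, off, num, count):
--     for i in range(count):
--         arr[off+i] = ( num >> ( 8 * (count-i-1) ) ) & 0xff
--
-- def name_to_bytes(name):
--     length = len(name)
--     arr = [0] * 4
--     num_to_list(arr,0,length,4)
--     t = arr + [ord(_) for _ in name]
--     r = len(t) % 8
--     if (r):
--         t += (8 - r) * [0]
--     return t
-- ===== SOURCE B (Python) =====
-- def name_to_bytes(name):
--     n = len(name)
--     # pack the whole record into one big integer: 32-bit length, then char codes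
--     num = n & 0xffffffff
--     for c in name:
--         num = num * 256 + ord(c)
--     size = -(-(4 + n) // 8) * 8          # total length rounded up to a multiple of 8
--     num = num << (8 * (size - 4 - n))    # shift in the trailing zero padding
--     out = []
--     for _ in range(size):
--         num, b = divmod(num, 256)
--         out.append(b)
--     out.reverse()
--     return out
-- ===== Notes on version B (the rewrite author's own statement) =====
-- stated objective: alternative
-- what changed: B packs the 32-bit length and all character codes into one big integer accumulator, shifts in the zero padding, and then extracts the padded byte string by repeated divmod-by-256 digit extraction (built back-to-front and reversed), instead of A's list construction via a shift-mask helper, concatenation and a conditional pad branch.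
import Mathlib
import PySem

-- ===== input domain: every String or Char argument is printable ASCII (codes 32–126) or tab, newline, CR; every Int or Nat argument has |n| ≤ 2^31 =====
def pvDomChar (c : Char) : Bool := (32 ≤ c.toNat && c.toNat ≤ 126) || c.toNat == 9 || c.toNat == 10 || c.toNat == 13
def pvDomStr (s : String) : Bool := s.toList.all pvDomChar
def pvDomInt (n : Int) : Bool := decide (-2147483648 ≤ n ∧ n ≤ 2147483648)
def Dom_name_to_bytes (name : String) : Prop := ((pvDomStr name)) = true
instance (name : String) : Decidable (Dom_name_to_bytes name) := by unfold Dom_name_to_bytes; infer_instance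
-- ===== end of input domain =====

-- B encodes the record (32-bit length, char codes, zero pad) as one big integer and
-- extracts its base-256 digits back-to-front, instead of A's list building via a
-- shift-mask helper, concatenation and a conditional pad branch (return value only).


-- ===== PORT A =====
def num_to_list (arr : List Int) (off num count : Int) : List Int :=
  (PySem.List.pyRange 0 count 1).foldl
    (fun a i => PySem.List.pySetD a (off + i)
      (PySem.Int.band (num >>> (8 * (count - i - 1)).toNat) 0xff)) arr

def name_to_bytes (name : String) : List Int :=
  let length : Int := PySem.Str.len name
  let arr : List Int := PySem.List.pyRepeat [0] 4
  let arr := num_to_list arr 0 length 4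
  let t := arr ++ name.toList.map (fun c => (c.toNat : Int))
  let r : Int := PySem.Int.mod (PySem.List.len t) 8
  if r ≠ 0 then t ++ PySem.List.pyRepeat [0] (8 - r) else t

-- ===== PORT B =====
def name_to_bytes_alt (name : String) : List Int :=
  let n : Int := PySem.Str.len name
  let num0 : Int := PySem.Int.band n 0xffffffff
  let num1 : Int := name.toList.foldl (fun a c => a * 256 + (c.toNat : Int)) num0
  let size : Int := -(PySem.Int.floordiv (-(4 + n)) 8) * 8
  let num2 : Int := num1 <<< (8 * (size - 4 - n)).toNat
  let st := (PySem.List.pyRange 0 size 1).foldl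
    (fun (s : Int × List Int) _ =>
      (PySem.Int.floordiv s.1 256, s.2 ++ [PySem.Int.mod s.1 256])) (num2, [])
  st.2.reverse

-- ===== PRECONDITION & SPEC =====
def Spec_name_to_bytes (name : String) (out : List Int) : Prop := out = name_to_bytes_alt name
instance (name : String) (out : List Int) : Decidable (Spec_name_to_bytes name out) := by unfold Spec_name_to_bytes; infer_instance

-- ===== CLAIM (what is proved, stated in full; the proofs are below) =====
def Claim_equal_name_to_bytes : Prop := ∀ (name : String), Dom_name_to_bytes name → Spec_name_to_bytes name (name_to_bytes name)

-- ===== LEMMAS AND PROOFS =====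

-- the four big-endian length bytes, shared value of both encodings
def pvHdr (n : Int) : List Int :=
  [PySem.Int.band (n >>> (24 : Nat)) 255, PySem.Int.band (n >>> (16 : Nat)) 255,
   PySem.Int.band (n >>> (8 : Nat)) 255, PySem.Int.band n 255]

lemma pyRange04 : PySem.List.pyRange 0 4 1 = [0, 1, 2, 3] := by decide

-- A's header helper on [0,0,0,0] produces the four bytes
lemma numToList_eq (n : Int) : num_to_list (PySem.List.pyRepeat [0] 4) 0 n 4 = pvHdr n := by
  rw [num_to_list, pyRange04]
  simp [List.foldl, PySem.List.pySetD_of_nonneg, List.set, pvHdr,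
    PySem.List.pyRepeat_singleton]

-- A's result in closed form: header, char codes, zero pad to a multiple of 8
lemma A_eq (name : String) :
    name_to_bytes name
      = pvHdr (name.toList.length : Int)
        ++ name.toList.map (fun c => (c.toNat : Int))
        ++ List.replicate (((4 + name.toList.length + 7) / 8) * 8 - 4 - name.toList.length) 0 := by
  unfold name_to_bytes
  set nn := name.toList.length with hnn
  have hlen : PySem.Str.len name = (nn : Int) := by simp [PySem.Str.len_eq, hnn]
  simp only [hlen]
  rw [numToList_eq]
  have hlent : PySem.List.len (pvHdr (nn : Int) ++ name.toList.map (fun c => (c.toNat : Int)))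
      = ((4 + nn : Nat) : Int) := by
    simp [PySem.List.len, pvHdr, hnn]; ring
  have hmod : PySem.Int.mod (((4 + nn : Nat) : Int)) 8 = (((4 + nn) % 8 : Nat) : Int) := by
    exact_mod_cast PySem.Int.mod_natCast (4 + nn) 8
  rw [hlent, hmod]
  by_cases hq : (4 + nn) % 8 = 0
  · have hpad : ((4 + nn + 7) / 8) * 8 - 4 - nn = 0 := by omega
    simp [hq, hpad]
  · have hne : (((4 + nn) % 8 : Nat) : Int) ≠ 0 := by exact_mod_cast hq
    rw [if_pos hne]
    have h8 : (4 + nn) % 8 < 8 := Nat.mod_lt _ (by omega)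
    have hcount : ((8 : Int) - (((4 + nn) % 8 : Nat) : Int)).toNat
        = ((4 + nn + 7) / 8) * 8 - 4 - nn := by omega
    rw [PySem.List.pyRepeat_singleton, hcount, List.append_assoc]

-- folding base-256 digits into an accumulator
def pvPack (v : Int) (L : List Int) : Int := L.foldl (fun a b => a * 256 + b) v

-- B's extraction loop, indexed by the remaining count (the loop ignores the range value)
def pvDigits : Nat → Int × List Int → Int × List Int
  | 0, s => s
  | k + 1, s => pvDigits k (PySem.Int.floordiv s.1 256, s.2 ++ [PySem.Int.mod s.1 256])

lemma foldl_ignore_eq_pvDigits (l : List Int) : ∀ s,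
    l.foldl (fun (s : Int × List Int) _ =>
      (PySem.Int.floordiv s.1 256, s.2 ++ [PySem.Int.mod s.1 256])) s
    = pvDigits l.length s := by
  induction l with
  | nil => intro s; rfl
  | cons x l ih =>
    intro s
    simp only [List.foldl_cons, List.length_cons, pvDigits]
    exact ih _

-- extracting as many digits as were packed recovers them, reversed, and restores the seed
lemma pvDigits_pack (L : List Int) : ∀ (v : Int) (acc : List Int),
    (∀ b ∈ L, 0 ≤ b ∧ b < 256) →
    pvDigits L.length (pvPack v L, acc) = (v, acc ++ L.reverse) := by
  induction L using List.reverseRecOn with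
  | nil => intro v acc _; simp [pvPack, pvDigits]
  | append_singleton L b ih =>
    intro v acc hb
    have hbb : 0 ≤ b ∧ b < 256 := hb b (by simp)
    have hpack : pvPack v (L ++ [b]) = pvPack v L * 256 + b := by
      simp [pvPack]
    have hdiv : PySem.Int.floordiv (pvPack v L * 256 + b) 256 = pvPack v L := by
      rw [PySem.Int.floordiv_eq_iff_of_pos (by norm_num)]
      constructor <;> nlinarith [hbb.1, hbb.2]
    have hmod : PySem.Int.mod (pvPack v L * 256 + b) 256 = b := by
      rw [PySem.Int.mod_eq_emod_of_pos (by norm_num)]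
      omega
    have hlen : (L ++ [b]).length = L.length + 1 := by simp
    rw [hlen, hpack, pvDigits, hdiv, hmod,
      ih v (acc ++ [b]) (fun x hx => hb x (by simp [hx]))]
    simp

-- packing the zero pad is multiplication by 256^pad
lemma pack_replicate_zero (p : Nat) (v : Int) :
    pvPack v (List.replicate p 0) = v * 256 ^ p := by
  induction p generalizing v with
  | zero => simp [pvPack]
  | succ p ih =>
    simp only [List.replicate_succ, pvPack, List.foldl_cons] at *
    rw [ih]; ring

-- packing the four header bytes from seed 0 is the 32-bit masked length
lemma pack_hdr (m : Nat) :
    pvPack 0 (pvHdr (m : Int)) = PySem.Int.band (m : Int) 0xffffffff := by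
  have hcast : ∀ k : Nat, ((m : Int) >>> k) = ((m >>> k : Nat) : Int) := fun k => by
    exact_mod_cast rfl
  have hand : ∀ a : Nat, PySem.Int.band (a : Int) 255 = ((a &&& 255 : Nat) : Int) :=
    fun a => by exact_mod_cast PySem.Int.band_natCast a 255
  have h255 : ∀ a : Nat, a &&& 255 = a % 256 := fun a => by
    have := Nat.and_two_pow_sub_one_eq_mod a 8; norm_num at this; exact this
  have hmask : PySem.Int.band (m : Int) 0xffffffff = ((m % 4294967296 : Nat) : Int) := by
    have := PySem.Int.band_natCast m 4294967295
    have h32 : m &&& 4294967295 = m % 4294967296 := by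
      have := Nat.and_two_pow_sub_one_eq_mod m 32; norm_num at this; exact this
    rw [h32] at this; exact_mod_cast this
  have hkey : (((m >>> 24 &&& 255) * 256 + (m >>> 16 &&& 255)) * 256 + (m >>> 8 &&& 255)) * 256
      + (m &&& 255) = m % 4294967296 := by
    simp [Nat.shiftRight_eq_div_pow, h255]
    omega
  simp only [pvPack, pvHdr, List.foldl_cons, List.foldl_nil, hcast, hand, hmask]
  push_cast [← hkey]
  ring

-- ===== VERDICT (by name: the statement is the Claim_ definition above) =====
theorem name_to_bytes_spec : Claim_equal_name_to_bytes := by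
  intro name hdom
  unfold Spec_name_to_bytes
  rw [A_eq]
  unfold name_to_bytes_alt
  set nn := name.toList.length with hnn
  have hlen : PySem.Str.len name = (nn : Int) := by simp [PySem.Str.len_eq, hnn]
  simp only [hlen]
  set P : Nat := ((4 + nn + 7) / 8) * 8 with hP
  set pad : Nat := P - 4 - nn with hpad
  -- the ceiling-division size equals P
  have hq1 : 4 + nn ≤ 8 * ((4 + nn + 7) / 8) := by omega
  have hq2 : 8 * ((4 + nn + 7) / 8) < 4 + nn + 8 := by omega
  have hsize : -(PySem.Int.floordiv (-(4 + (nn : Int))) 8) = ((4 + nn + 7) / 8 : Nat) := by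
    rw [PySem.Int.neg_floordiv_neg_eq_iff_of_pos (by norm_num)]
    constructor <;> (push_cast; omega)
  rw [hsize]
  have hPc : (((4 + nn + 7) / 8 : Nat) : Int) * 8 = (P : Int) := by push_cast [hP]; ring
  rw [hPc]
  -- the shifted accumulator packs the whole closed-form list
  set F : List Int := pvHdr (nn : Int) ++ name.toList.map (fun c => (c.toNat : Int))
      ++ List.replicate pad 0 with hF
  have hP4 : 4 + nn ≤ P := by omega
  have hshift : ((8 : Int) * ((P : Int) - 4 - (nn : Int))).toNat = 8 * pad := by omega
  have hpackF : pvPack 0 F = (name.toList.foldl (fun a c => a * 256 + (c.toNat : Int))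
      (PySem.Int.band (nn : Int) 0xffffffff)) <<< (8 * ((P : Int) - 4 - (nn : Int))).toNat := by
    rw [hshift, Int.shiftLeft_eq]
    have h2 : (2 : Int) ^ (8 * pad) = 256 ^ pad := by
      rw [pow_mul]; norm_num
    rw [h2, hF, pvPack, List.foldl_append, List.foldl_append]
    rw [show (pvHdr (nn : Int)).foldl (fun a b => a * 256 + b) 0 = pvPack 0 (pvHdr (nn : Int)) from rfl,
      pack_hdr, List.foldl_map,
      show ∀ v, (List.replicate pad (0 : Int)).foldl (fun a b => a * 256 + b) v
        = pvPack v (List.replicate pad 0) from fun v => rfl,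
      pack_replicate_zero]
  -- run the extraction loop
  have hlenP : (PySem.List.pyRange 0 (P : Int) 1).length = P := by
    rw [PySem.List.length_pyRange_one]; omega
  have hFlen : F.length = P := by
    simp only [hF, List.length_append, List.length_map, List.length_replicate, pvHdr,
      List.length_cons, List.length_nil]
    omega
  have hbounds : ∀ b ∈ F, 0 ≤ b ∧ b < 256 := by
    intro b hb
    rw [hF] at hb
    simp only [List.mem_append] at hb
    rcases hb with (hb | hb) | hb
    · -- header bytes: each is a Nat masked with 255
      have hcast : ∀ k : Nat, ((nn : Int) >>> k) = ((nn >>> k : Nat) : Int) := fun k => by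
        exact_mod_cast rfl
      have hand : ∀ a : Nat, PySem.Int.band (a : Int) 255 = ((a &&& 255 : Nat) : Int) :=
        fun a => by exact_mod_cast PySem.Int.band_natCast a 255
      have h255 : ∀ a : Nat, a &&& 255 < 256 := fun a => by
        have := Nat.and_two_pow_sub_one_eq_mod a 8; norm_num at this; omega
      simp only [pvHdr, List.mem_cons, List.not_mem_nil, or_false, hcast, hand] at hb
      rcases hb with rfl | rfl | rfl | rfl <;>
        exact ⟨by positivity, by exact_mod_cast h255 _⟩
    · -- character codes: printable ASCII (or tab/newline/CR) by Dom
      obtain ⟨c, hc, rfl⟩ := List.mem_map.mp hb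
      have := List.all_eq_true.mp hdom c hc
      simp [pvDomChar] at this
      constructor
      · positivity
      · omega
    · -- zero padding
      rcases List.eq_of_mem_replicate hb with rfl; norm_num
  rw [foldl_ignore_eq_pvDigits, hlenP, ← hpackF, ← hFlen, pvDigits_pack F 0 [] hbounds]
  simp [hF]
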